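-- pv_equiv track=rewrite | github.com/duartega/cs415Project1 | Project1.py | consec_int_checking
-- ===== SOURCE A (Python) =====
-- def consec_int_checking(m,n, count, done):
--
--     # Initialize the variables
--     temp = 0.0
--     temp2 = 1.0
--     t = 0.0
--     original_n = int(n) # Hold our original value of n as n will change
--
--     # Create the base case for m and n
--     if (int(n) == 0 or int (m) == 0):
--         return 0
--
--     # Create another base case because we check to see the lower of the two
--     # variables before finding gcd
--     if (int(n) == int(m)):
--         return int(m)
--
--     # Did a swap instead so that we dont have to rewrite the while loop (below)
--     if (int(n) > int(m)):
--         swap = int(n)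
--         n = int(m)
--         m = swap
--         original_n = int(n) # Hold our original value of n as n will change
--
--     if (int(n) < int(m)):
--         count = int(0)
--         while (int(temp2) != 0.0):
--             t = int(n)
--             temp = int(m) % int(t)
--             count += 1
--
--             # Once the algorithm finds that temp = 0, then find gcd for temp2
--             if (int(temp) == 0.0):
--                 temp2 = int(original_n) % int(t)
--                 count += 1
--
--                 # If temp is equal to temp2, then we have found the gcd
--                 if (int(temp2) == 0.0 and int(temp) == int(temp2)):
--
--                     return count
--                 else:
--                     n = int(n) - int(1.0)
--             else:
--                 n = int(n) - int(1.0)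
-- ===== SOURCE B (Python) =====
-- def consec_int_checking(m, n, count, done):
--     # Euclid's gcd, then a single arithmetic count: A's trial descent from min(m,n)
--     # performs one step per candidate plus one extra step per divisor of max(m,n).
--     if n == 0 or m == 0:
--         return 0
--     if n == m:
--         return m
--     lo, hi = (m, n) if m < n else (n, m)
--     a, b = hi, lo
--     while b:
--         a, b = b, a % b
--     g = a
--     divs = sum(1 for t in range(g, lo + 1) if hi % t == 0)
--     return (lo - g + 1) + divs
-- ===== Notes on version B (the rewrite author's own statement) =====
-- stated objective: faster
-- what changed: A discovers the gcd by trial descent from min(m,n) with a stateful double-counting loop; B computes the gcd with Euclid's algorithm and then returns the iteration count arithmetically as (min-gcd+1) plus the number of divisors of max(m,n) in [gcd,min]; Pre_ excludes the distinct nonzero inputs whose minimum is negative and does not divide the maximum, on which A loops forever.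
import Mathlib
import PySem

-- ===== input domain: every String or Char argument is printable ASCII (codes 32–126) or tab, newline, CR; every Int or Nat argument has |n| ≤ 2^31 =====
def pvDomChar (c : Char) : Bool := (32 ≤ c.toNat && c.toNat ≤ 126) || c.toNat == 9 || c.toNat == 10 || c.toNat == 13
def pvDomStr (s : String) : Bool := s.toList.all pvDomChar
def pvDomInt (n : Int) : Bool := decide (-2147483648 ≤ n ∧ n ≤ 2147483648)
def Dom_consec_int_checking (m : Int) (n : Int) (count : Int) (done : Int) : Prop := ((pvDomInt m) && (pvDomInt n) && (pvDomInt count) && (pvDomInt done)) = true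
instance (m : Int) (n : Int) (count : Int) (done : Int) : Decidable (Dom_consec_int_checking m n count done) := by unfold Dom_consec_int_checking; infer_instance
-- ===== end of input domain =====

-- B replaces A's gcd-discovering trial descent by Euclid's gcd plus an arithmetic count of
-- the descent's steps ((min-gcd+1) + number of divisors of max in [gcd,min]); equivalence
-- is about the return value.

-- ===== PORT A =====
-- A's while loop: n descends by 1 each pass; `count` gains 1 per pass and one more when
-- t divides m; returns when t divides both m and original_n. Fuel only makes the
-- recursion total (the Python loop condition int(temp2) != 0 never exits the loop itself:
-- temp2 starts at 1 and is only re-tested after being set to a nonzero value).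
def consecLoopA (m orig : Int) : Nat → Int → Int → Int
  | 0, _, _ => 0  -- fuel exhausted: unreachable on inputs admitted by Pre_
  | fuel + 1, n, count =>
    if PySem.Int.mod m n = 0 then            -- t = n; temp = int(m) % int(t); count += 1
      if PySem.Int.mod orig n = 0 then       -- temp2 = int(original_n) % int(t); count += 1
        count + 1 + 1                        -- return count
      else consecLoopA m orig fuel (n - 1) (count + 1 + 1)   -- n = n - 1
    else consecLoopA m orig fuel (n - 1) (count + 1)         -- n = n - 1

def consec_int_checking (m : Int) (n : Int) (count : Int) (done : Int) : Int :=
  if n = 0 ∨ m = 0 then 0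
  else if n = m then m
  else if n > m then
    -- swap: m := old n, n := old m, original_n := new n; then n < m holds
    if m < n then consecLoopA n m (m.toNat + 1) m 0 else 0   -- else-branch unreachable (Python falls off the end)
  else
    if n < m then consecLoopA m n (n.toNat + 1) n 0 else 0   -- else-branch unreachable

-- ===== PORT B =====
-- Source B's Euclid loop `while b: a, b = b, a % b`; fuel: |b| strictly decreases each step
def euclidB (a b : Int) : Nat → Int
  | 0 => a
  | fuel + 1 => if b = 0 then a else euclidB b (PySem.Int.mod a b) fuel

def consec_int_checking_alt (m : Int) (n : Int) (count : Int) (done : Int) : Int :=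
  if m = 0 ∨ n = 0 then 0
  else if m = n then m
  else
    -- lo, hi = (m, n) if m < n else (n, m)
    (if m < n then m else n) - euclidB (if m < n then n else m) (if m < n then m else n) ((if m < n then m else n).natAbs + 1) + 1 +
      -- divs = sum(1 for t in range(g, lo + 1) if hi % t == 0)
      ((PySem.List.pyRange (euclidB (if m < n then n else m) (if m < n then m else n) ((if m < n then m else n).natAbs + 1)) ((if m < n then m else n) + 1) 1).filter
        (fun t => PySem.Int.mod (if m < n then n else m) t = 0)).length

-- ===== PRECONDITION & SPEC =====
-- Pre_ excludes exactly the inputs on which A never returns: distinct nonzero m, n whose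
-- minimum is negative and does not divide the maximum make A's descent run downward past
-- every common divisor and loop forever.
def Pre_consec_int_checking (m : Int) (n : Int) (count : Int) (done : Int) : Prop :=
  m = 0 ∨ n = 0 ∨ m = n ∨ (0 < m ∧ 0 < n) ∨ (min m n < 0 ∧ min m n ∣ max m n)
instance (m : Int) (n : Int) (count : Int) (done : Int) : Decidable (Pre_consec_int_checking m n count done) := by unfold Pre_consec_int_checking; infer_instance

def pvWitness_consec_int_checking : Int × Int × Int × Int := (6, 4, 0, 0)

def Spec_consec_int_checking (m : Int) (n : Int) (count : Int) (done : Int) (out : Int) : Prop := out = consec_int_checking_alt m n count done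
instance (m : Int) (n : Int) (count : Int) (done : Int) (out : Int) : Decidable (Spec_consec_int_checking m n count done out) := by unfold Spec_consec_int_checking; infer_instance

-- ===== CLAIM (what is proved, stated in full; the proofs are below) =====
def Claim_equal_consec_int_checking : Prop := ∀ (m : Int) (n : Int) (count : Int) (done : Int), Dom_consec_int_checking m n count done → Pre_consec_int_checking m n count done → Spec_consec_int_checking m n count done (consec_int_checking m n count done)

-- ===== LEMMAS AND PROOFS =====

-- when b divides a, Euclid's loop stops after one step and returns b
theorem euclidB_of_dvd (a b : Int) (hb : b ≠ 0) (hd : b ∣ a) (fuel : Nat) :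
    euclidB a b (fuel + 2) = b := by
  rw [euclidB, if_neg hb, (PySem.Int.mod_eq_zero_iff_dvd a b).mpr hd, euclidB, if_pos rfl]

-- one Euclid step preserves the gcd
theorem gcd_emod_step (a b : Int) : Int.gcd b (a % b) = Int.gcd a b := by
  apply Nat.dvd_antisymm
  · apply Int.dvd_gcd
    · have h1 : (Int.gcd b (a % b) : Int) ∣ b := Int.gcd_dvd_left b (a % b)
      have h2 : (Int.gcd b (a % b) : Int) ∣ a % b := Int.gcd_dvd_right b (a % b)
      have := Int.emod_add_mul_ediv a b
      calc (Int.gcd b (a % b) : Int) ∣ a % b + b * (a / b) := Dvd.dvd.add h2 (h1.mul_right _)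
        _ = a := this
    · exact Int.gcd_dvd_left b (a % b)
  · apply Int.dvd_gcd
    · exact Int.gcd_dvd_right a b
    · have h1 : (Int.gcd a b : Int) ∣ a := Int.gcd_dvd_left a b
      have h2 : (Int.gcd a b : Int) ∣ b := Int.gcd_dvd_right a b
      have : a % b = a - b * (a / b) := by rw [Int.emod_def]
      rw [this]
      exact Dvd.dvd.sub h1 (h2.mul_right _)

-- Euclid's loop computes Int.gcd (a > 0, b ≥ 0, enough fuel)
theorem euclidB_eq_gcd (fuel : Nat) : ∀ (a b : Int), 0 < a → 0 ≤ b → b.natAbs < fuel →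
    euclidB a b fuel = (Int.gcd a b : Int) := by
  induction fuel with
  | zero => intro a b _ _ h; omega
  | succ fuel ih =>
    intro a b ha hb hfuel
    by_cases hb0 : b = 0
    · subst hb0
      simp [euclidB, Int.gcd, Int.natAbs_of_nonneg ha.le]
    · have hbpos : 0 < b := lt_of_le_of_ne hb (Ne.symm hb0)
      have hmod : PySem.Int.mod a b = a % b := PySem.Int.mod_eq_emod_of_pos hbpos
      have hrnn : 0 ≤ a % b := Int.emod_nonneg a hb0
      have hrlt : a % b < b := Int.emod_lt_of_pos a hbpos
      rw [euclidB, if_neg hb0, hmod, ih b (a % b) hbpos hrnn (by omega)]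
      rw [gcd_emod_step a b]

-- the core invariant: starting the descent at t = g + k (g := gcd m orig as an Int),
-- A's loop returns count + (k+1) + #(divisors of m in [g, g+k])
theorem consecLoopA_eq (m orig : Int) (hm : 0 < m) (ho : 0 < orig) :
    ∀ (k : Nat) (fuel : Nat) (count : Int), k < fuel →
    consecLoopA m orig fuel ((Int.gcd m orig : Int) + k) count =
      count + (k + 1) +
        ((PySem.List.pyRange (Int.gcd m orig : Int) ((Int.gcd m orig : Int) + k + 1) 1).filter
          (fun t => PySem.Int.mod m t = 0)).length := by
  set g : Int := (Int.gcd m orig : Int) with hg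
  have hgpos : 0 < g := by
    simp only [hg]
    exact_mod_cast Int.gcd_pos_of_ne_zero_left orig (by omega)
  have hgm : g ∣ m := Int.gcd_dvd_left m orig
  have hgo : g ∣ orig := Int.gcd_dvd_right m orig
  intro k
  induction k with
  | zero =>
    intro fuel count hfuel
    obtain ⟨fuel, rfl⟩ : ∃ f, fuel = f + 1 := ⟨fuel - 1, by omega⟩
    simp only [Nat.cast_zero, add_zero]
    have h1 : PySem.Int.mod m g = 0 := (PySem.Int.mod_eq_zero_iff_dvd m g).mpr hgm
    have h2 : PySem.Int.mod orig g = 0 := (PySem.Int.mod_eq_zero_iff_dvd orig g).mpr hgo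
    rw [consecLoopA, if_pos h1, if_pos h2, PySem.List.pyRange_one_singleton g]
    simp [List.filter, h1]
  | succ k ih =>
    intro fuel count hfuel
    obtain ⟨fuel, rfl⟩ : ∃ f, fuel = f + 1 := ⟨fuel - 1, by omega⟩
    have ht : g + ((k + 1 : Nat) : Int) = g + k + 1 := by push_cast; ring
    rw [ht, consecLoopA]
    have hnotboth : ¬ (PySem.Int.mod m (g + k + 1) = 0 ∧ PySem.Int.mod orig (g + k + 1) = 0) := by
      rintro ⟨h1, h2⟩
      have d1 := (PySem.Int.mod_eq_zero_iff_dvd m (g + k + 1)).mp h1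
      have d2 := (PySem.Int.mod_eq_zero_iff_dvd orig (g + k + 1)).mp h2
      have hceq : ((g + k + 1).toNat : Int) = g + k + 1 := Int.toNat_of_nonneg (by omega)
      have hdg' : (g + k + 1).toNat ∣ Int.gcd m orig :=
        Int.dvd_gcd (hceq ▸ d1) (hceq ▸ d2)
      have hdg : (g + k + 1) ∣ g := by
        rw [← hceq, hg]
        exact_mod_cast hdg'
      have := Int.le_of_dvd hgpos hdg
      omega
    have hsplit : PySem.List.pyRange g (g + k + 1 + 1) 1 =
        PySem.List.pyRange g (g + k + 1) 1 ++ [g + k + 1] :=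
      PySem.List.pyRange_one_succ_right (by omega)
    have hsub : g + (k : Int) + 1 - 1 = g + (k : Int) := by ring
    by_cases hmt : PySem.Int.mod m (g + k + 1) = 0
    · have hot : ¬ PySem.Int.mod orig (g + k + 1) = 0 := fun h => hnotboth ⟨hmt, h⟩
      rw [if_pos hmt, if_neg hot, hsub, ih fuel (count + 1 + 1) (by omega), hsplit,
        List.filter_append]
      simp [List.filter, hmt]
      ring
    · rw [if_neg hmt, hsub, ih fuel (count + 1) (by omega), hsplit, List.filter_append]
      simp [List.filter, hmt]
      ring

-- ===== VERDICT (by name: the statement is the Claim_ definition above) =====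
theorem consec_int_checking_spec : Claim_equal_consec_int_checking := by
  intro m n count done _hdom hpre
  unfold Spec_consec_int_checking consec_int_checking consec_int_checking_alt
  by_cases hz : m = 0 ∨ n = 0
  · rcases hz with h0 | h0 <;> simp [h0]
  · have hm0 : m ≠ 0 := by tauto
    have hn0 : n ≠ 0 := by tauto
    by_cases hmn : m = n
    · subst hmn; simp [hm0]
    · rw [if_neg (show ¬ (n = 0 ∨ m = 0) by tauto), if_neg (Ne.symm hmn),
        if_neg (show ¬ (m = 0 ∨ n = 0) by tauto), if_neg hmn]
      have hcase : (0 < m ∧ 0 < n) ∨ (min m n < 0 ∧ min m n ∣ max m n) := by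
        unfold Pre_consec_int_checking at hpre; tauto
      rcases hcase with ⟨hm, hn⟩ | ⟨hlo, hdvd⟩
      swap
      · -- negative minimum dividing the maximum: both sides return 2
        rcases lt_or_gt_of_ne hmn with hlt | hgt
        · -- m < n : lo = m < 0, m ∣ n; A swaps
          rw [min_eq_left hlt.le] at hlo hdvd
          rw [max_eq_right hlt.le] at hdvd
          simp only [gt_iff_lt, if_pos hlt]
          rw [show m.toNat + 1 = 0 + 1 from by rw [Int.toNat_of_nonpos hlo.le],
            consecLoopA, if_pos ((PySem.Int.mod_eq_zero_iff_dvd n m).mpr hdvd),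
            if_pos ((PySem.Int.mod_eq_zero_iff_dvd m m).mpr dvd_rfl),
            show m.natAbs + 1 = (m.natAbs - 1) + 2 from by omega,
            euclidB_of_dvd n m hm0 hdvd, PySem.List.pyRange_one_singleton m]
          simp [List.filter, (PySem.Int.mod_eq_zero_iff_dvd n m).mpr hdvd]
        · -- n < m : lo = n < 0, n ∣ m; no swap
          rw [min_eq_right hgt.le] at hlo hdvd
          rw [max_eq_left hgt.le] at hdvd
          simp only [gt_iff_lt, if_neg (show ¬ m < n by omega), if_pos hgt]
          rw [show n.toNat + 1 = 0 + 1 from by rw [Int.toNat_of_nonpos hlo.le],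
            consecLoopA, if_pos ((PySem.Int.mod_eq_zero_iff_dvd m n).mpr hdvd),
            if_pos ((PySem.Int.mod_eq_zero_iff_dvd n n).mpr dvd_rfl),
            show n.natAbs + 1 = (n.natAbs - 1) + 2 from by omega,
            euclidB_of_dvd m n hn0 hdvd, PySem.List.pyRange_one_singleton n]
          simp [List.filter, (PySem.Int.mod_eq_zero_iff_dvd m n).mpr hdvd]
      rcases lt_or_gt_of_ne hmn with hlt | hgt
      · -- m < n : A swaps (n > m): loop is consecLoopA n m; B: lo = m, hi = n
        simp only [gt_iff_lt, if_pos hlt]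
        have hg := euclidB_eq_gcd (m.natAbs + 1) n m (by omega) (by omega) (by omega)
        have hgpos : 0 < ((Int.gcd n m : Nat) : Int) := by
          exact_mod_cast Int.gcd_pos_of_ne_zero_left m hn0
        have hgle : ((Int.gcd n m : Nat) : Int) ≤ m := Int.le_of_dvd hm (Int.gcd_dvd_right n m)
        obtain ⟨k, hk⟩ : ∃ k : Nat, m = (Int.gcd n m : Int) + k :=
          ⟨(m - (Int.gcd n m : Int)).toNat, by omega⟩
        have key := consecLoopA_eq n m (by omega) hm k (m.toNat + 1) 0 (by omega)
        rw [← hk] at key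
        rw [hg, key]
        omega
      · -- n < m : no swap: loop is consecLoopA m n; B: lo = n, hi = m
        simp only [gt_iff_lt, if_neg (show ¬ m < n by omega), if_pos hgt]
        have hg := euclidB_eq_gcd (n.natAbs + 1) m n (by omega) (by omega) (by omega)
        have hgpos : 0 < ((Int.gcd m n : Nat) : Int) := by
          exact_mod_cast Int.gcd_pos_of_ne_zero_left n hm0
        have hgle : ((Int.gcd m n : Nat) : Int) ≤ n := Int.le_of_dvd hn (Int.gcd_dvd_right m n)
        obtain ⟨k, hk⟩ : ∃ k : Nat, n = (Int.gcd m n : Int) + k :=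
          ⟨(n - (Int.gcd m n : Int)).toNat, by omega⟩
        have key := consecLoopA_eq m n hm (by omega) k (n.toNat + 1) 0 (by omega)
        rw [← hk] at key
        rw [hg, key]
        omega
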